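-- pv_equiv track=rewrite | github.com/olsenw/LeetCodeExercises | Python3/count_monobit_integers.py | countMonobit
-- ===== SOURCE A (Python) =====
-- def countMonobit(n: int) -> int:
--     answer = 1
--     count = 1
--     while count <= n:
--         answer += 1
--         count <<= 1
--         count += 1
--     return answer
-- ===== SOURCE B (Python) =====
-- def countMonobit(n: int) -> int:
--     return (max(n, 0) + 1).bit_length()
-- ===== Notes on version B (the rewrite author's own statement) =====
-- stated objective: simpler
-- what changed: Replaced the doubling while-loop with a closed form: the count of all-ones binary integers up to n equals the bit length of n's successor, with negative n clamped to zero first.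
import Mathlib
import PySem

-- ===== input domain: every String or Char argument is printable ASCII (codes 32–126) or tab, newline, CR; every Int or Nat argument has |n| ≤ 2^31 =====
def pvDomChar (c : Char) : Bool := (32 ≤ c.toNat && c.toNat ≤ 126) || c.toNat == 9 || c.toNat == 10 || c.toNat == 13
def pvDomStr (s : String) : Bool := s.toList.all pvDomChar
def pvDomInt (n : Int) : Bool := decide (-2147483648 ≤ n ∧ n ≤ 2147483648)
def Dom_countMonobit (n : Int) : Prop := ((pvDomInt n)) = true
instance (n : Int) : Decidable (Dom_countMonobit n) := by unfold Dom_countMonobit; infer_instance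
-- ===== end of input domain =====

-- ===== PORT A =====
-- termination measure fact for the loop below (cited by name in decreasing_by)
theorem pvLoop_countMonobit_dec (n : Int) (count : Nat) (h : (count : Int) ≤ n) :
    (n + 1 - ((2 * count + 1 : Nat) : Int)).toNat < (n + 1 - (count : Nat)).toNat := by
  push_cast
  omega

-- while count <= n: answer += 1; count = (count << 1) + 1
def pvLoop_countMonobit (n : Int) (answer : Int) (count : Nat) : Int :=
  if (count : Int) ≤ n then pvLoop_countMonobit n (answer + 1) (2 * count + 1) else answer
termination_by (n + 1 - count).toNat
decreasing_by
  rename_i h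
  exact pvLoop_countMonobit_dec n count h

def countMonobit (n : Int) : Int := pvLoop_countMonobit n 1 1

-- ===== PORT B =====
-- (max(n, 0) + 1).bit_length()  — bit_length ported as Nat.size
def countMonobit_alt (n : Int) : Int := ((max n 0 + 1).toNat.size : Int)

-- ===== PRECONDITION & SPEC =====
def Spec_countMonobit (n : Int) (out : Int) : Prop := out = countMonobit_alt n
instance (n : Int) (out : Int) : Decidable (Spec_countMonobit n out) := by unfold Spec_countMonobit; infer_instance

-- ===== CLAIM (what is proved, stated in full; the proofs are below) =====
def Claim_equal_countMonobit : Prop := ∀ (n : Int), Dom_countMonobit n → Spec_countMonobit n (countMonobit n)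

-- ===== LEMMAS AND PROOFS =====

-- ===== VERDICT (by name: the statement is the Claim_ definition above) =====
-- Loop characterisation: started at count = 2^t - 1 (t ≥ 1), the loop adds
-- (size of (n+1).toNat) - t (truncated Nat subtraction) to the accumulator.
theorem pvLoop_eq (k : Nat) : ∀ (n a : Int) (t : Nat), 1 ≤ t →
    Nat.size (n + 1).toNat ≤ t + k →
    pvLoop_countMonobit n a (2 ^ t - 1) = a + ((Nat.size (n + 1).toNat - t : Nat) : Int) := by
  induction k with
  | zero =>
    intro n a t ht hk
    rw [pvLoop_countMonobit]
    have hcond : ¬ ((((2 ^ t - 1 : Nat)) : Int) ≤ n) := by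
      intro hle
      have hpow : (1 : Nat) ≤ 2 ^ t := Nat.one_le_two_pow
      have h2 : (2 ^ t : Nat) ≤ (n + 1).toNat := by omega
      have := Nat.lt_size.mpr h2
      omega
    rw [if_neg hcond]
    omega
  | succ k ih =>
    intro n a t ht hk
    rw [pvLoop_countMonobit]
    have hpow : (1 : Nat) ≤ 2 ^ t := Nat.one_le_two_pow
    by_cases hcond : (((2 ^ t - 1 : Nat)) : Int) ≤ n
    · rw [if_pos hcond]
      have h2 : (2 ^ t : Nat) ≤ (n + 1).toNat := by omega
      have hlt : t < Nat.size (n + 1).toNat := Nat.lt_size.mpr h2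
      have hcount : 2 * (2 ^ t - 1) + 1 = 2 ^ (t + 1) - 1 := by
        have : (2 : Nat) ^ (t + 1) = 2 * 2 ^ t := by ring
        omega
      rw [hcount, ih n (a + 1) (t + 1) (by omega) (by omega)]
      omega
    · rw [if_neg hcond]
      have hnot : ¬ (2 ^ t : Nat) ≤ (n + 1).toNat := by
        intro h2
        have hm : (1 : Int) ≤ n + 1 := by
          have := Nat.one_le_two_pow (n := t)
          by_contra hc
          simp [Int.toNat_of_nonpos (by omega : n + 1 ≤ 0)] at h2
        have : ((2 ^ t : Nat) : Int) ≤ n + 1 := by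
          have := Int.toNat_of_nonneg (by omega : (0 : Int) ≤ n + 1)
          omega
        push_cast at this
        push_cast at hcond
        omega
      have : Nat.size (n + 1).toNat ≤ t := by
        by_contra hc
        exact hnot (Nat.lt_size.mp (by omega))
      omega

theorem countMonobit_spec : Claim_equal_countMonobit := by
  intro n _
  unfold Spec_countMonobit countMonobit countMonobit_alt
  have h1 : (2 : Nat) ^ 1 - 1 = 1 := by norm_num
  have := pvLoop_eq (Nat.size (n + 1).toNat) n 1 1 (by omega) (by omega)
  rw [h1] at this
  rw [this]
  by_cases hn : 0 ≤ n
  · have hmax : max n 0 = n := by omega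
    rw [hmax]
    have hpos : 0 < (n + 1).toNat := by omega
    have := Nat.size_pos.mpr hpos
    omega
  · have hmax : max n 0 = 0 := by omega
    rw [hmax]
    have h0 : (n + 1).toNat ≤ 1 := by omega
    have hs : Nat.size (n + 1).toNat ≤ 1 := by
      interval_cases h : (n + 1).toNat <;> simp [Nat.size]
    norm_num
    omega
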